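-- pv_equiv track=rewrite | github.com/cwijayasundara/legacy_mod_maf_v1 | ms-agent-harness/agent_harness/discovery/story_decomposer.py | _break_cycles
-- ===== SOURCE A (Python) =====
-- def _break_cycles(raw_deps: dict[str, set[str]], module_order: list[str]) -> dict[str, set[str]]:
--     """Keep only dependency edges that preserve an acyclic module order."""
--     kept: dict[str, set[str]] = {module: set() for module in module_order}
--     position = {module: idx for idx, module in enumerate(module_order)}
--     for module in module_order:
--         for dep in sorted(raw_deps.get(module, set()), key=lambda item: position.get(item, 10**9)):
--             if dep not in position:
--                 continue
--             if _reachable(dep, module, kept):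
--                 continue
--             kept[module].add(dep)
--     return kept
--
-- def _reachable(start: str, target: str, deps: dict[str, set[str]]) -> bool:
--     stack = [start]
--     seen: set[str] = set()
--     while stack:
--         cur = stack.pop()
--         if cur == target:
--             return True
--         if cur in seen:
--             continue
--         seen.add(cur)
--         stack.extend(deps.get(cur, set()))
--     return False
-- ===== SOURCE B (Python) =====
-- def _break_cycles(raw_deps: dict[str, set[str]], module_order: list[str]) -> dict[str, set[str]]:
--     """Keep only dependency edges that preserve an acyclic module order.
--
--     Incremental transitive closure: instead of running a graph search over the
--     kept edges for every candidate edge, maintain reach[u] = modules reachable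
--     from u over kept edges (including u) and coreach[v] = modules that reach v.
--     A candidate edge module->dep closes a cycle exactly when module is already
--     in reach[dep]; accepting an edge merges reach[dep] into reach[u] for every
--     ancestor u of module and coreach[module] into coreach[v] for every
--     descendant v of dep.  No graph search is ever performed.
--     """
--     kept = {m: set() for m in module_order}
--     position = {m: i for i, m in enumerate(module_order)}
--     reach = {m: {m} for m in module_order}
--     coreach = {m: {m} for m in module_order}
--     for module in module_order:
--         for dep in sorted(raw_deps.get(module, set()), key=lambda item: position.get(item, 10**9)):
--             if dep not in position:
--                 continue
--             if module in reach[dep]: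
--                 continue  # dep already reaches module: edge would close a cycle
--             kept[module].add(dep)
--             target = reach[dep]
--             source = coreach[module]
--             for u in source:
--                 reach[u] |= target
--             for v in target:
--                 coreach[v] |= source
--     return kept
-- ===== Notes on version B (the rewrite author's own statement) =====
-- stated objective: alternative
-- what changed: B replaces A's per-candidate depth-first search over the kept edges with an incrementally maintained transitive closure (reach[u]/coreach[v] = descendants/ancestors over kept edges), so each candidate edge is decided by one set-membership test and each accepted edge merges closure sets; no graph search remains.
import Mathlib
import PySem

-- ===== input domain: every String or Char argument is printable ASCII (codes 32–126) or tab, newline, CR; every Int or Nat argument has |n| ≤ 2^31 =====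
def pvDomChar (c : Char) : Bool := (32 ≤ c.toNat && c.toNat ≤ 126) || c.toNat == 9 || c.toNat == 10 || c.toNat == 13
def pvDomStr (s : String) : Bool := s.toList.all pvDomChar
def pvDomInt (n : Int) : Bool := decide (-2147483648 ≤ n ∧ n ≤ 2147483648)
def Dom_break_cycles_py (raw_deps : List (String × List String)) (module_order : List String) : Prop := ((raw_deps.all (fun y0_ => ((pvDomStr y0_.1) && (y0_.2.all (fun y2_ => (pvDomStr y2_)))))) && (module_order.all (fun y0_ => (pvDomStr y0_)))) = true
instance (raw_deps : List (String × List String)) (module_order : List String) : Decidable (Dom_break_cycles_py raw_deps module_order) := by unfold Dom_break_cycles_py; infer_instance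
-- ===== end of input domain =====

-- B replaces A's per-candidate depth-first search over the kept edges by an incrementally
-- maintained transitive closure (reach[u] = modules reachable from u over kept edges).


-- ===== PORT A =====
-- termination helper for _reachable's search loop (cited by its decreasing_by block)
theorem bcFilterLt (l seen : List String) (cur : String)
    (hmem : cur ∈ l) (hseen : ¬ seen.contains cur = true) :
    (l.filter (fun k => !((seen ++ [cur]).contains k))).length <
      (l.filter (fun k => !(seen.contains k))).length := by
  have himp : ∀ a, (!((seen ++ [cur]).contains a)) = true → (!(seen.contains a)) = true := by
    intro a ha
    simp only [List.contains_append, Bool.not_or, Bool.and_eq_true, Bool.not_eq_true'] at ha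
    simpa using ha.1
  have hsub := List.monotone_filter_right l himp
  rcases lt_or_eq_of_le (List.Sublist.length_le hsub) with h | h
  · exact h
  · exfalso
    have heq := List.Sublist.eq_of_length hsub h
    have hin : cur ∈ l.filter (fun k => !(seen.contains k)) := by
      simp only [List.mem_filter]
      exact ⟨hmem, by simpa using hseen⟩
    rw [← heq] at hin
    simp [List.mem_filter] at hin

-- _reachable's while loop.  Python's list.pop() pops from the END, so the stack is held
-- top-first here and stack.extend(xs) pushes xs reversed (exact for the computed result).
def reachLoop (deps : PySem.Dict String (List String)) (target : String)
    (stack : List String) (seen : PySem.Set String) : Bool :=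
  match stack with
  | [] => false
  | cur :: rest =>
    if cur == target then true
    else if PySem.Set.contains seen cur then reachLoop deps target rest seen
    else reachLoop deps target ((deps.getD cur []).reverse ++ rest) (PySem.Set.add seen cur)
termination_by ((deps.keys.filter (fun k => !(PySem.Set.contains seen k))).length, stack.length)
decreasing_by
  · exact Prod.Lex.right _ (by simp)
  · rename_i _ hseen
    have hseen' : ¬ List.contains seen cur = true := by
      simpa [PySem.Set.contains] using hseen
    have hadd : PySem.Set.add seen cur = seen ++ [cur] := by
      simp only [PySem.Set.add, PySem.Set.contains]
      rw [if_neg hseen']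
    by_cases hk : deps.contains cur = true
    · apply Prod.Lex.left
      simp only [PySem.Set.contains, hadd]
      exact bcFilterLt _ _ _ ((PySem.Dict.contains_iff_mem_keys deps cur).mp hk) hseen'
    · have hget : deps.getD cur [] = [] :=
        PySem.Dict.getD_of_not_contains deps [] (by simpa using hk)
      have hfilt : deps.keys.filter (fun k => !(PySem.Set.contains (PySem.Set.add seen cur) k))
          = deps.keys.filter (fun k => !(PySem.Set.contains seen k)) := by
        apply List.filter_congr
        intro a ha
        have hne : a ≠ cur := fun h => hk ((PySem.Dict.contains_iff_mem_keys deps cur).mpr (h ▸ ha))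
        simp [hadd, PySem.Set.contains, hne]
      rw [hget, hfilt]
      exact Prod.Lex.right _ (by simp)

def break_cycles_py (raw_deps : List (String × List String)) (module_order : List String) : List (String × List String) :=
  let rawd : PySem.Dict String (List String) := PySem.Dict.mk raw_deps
  let kept0 : PySem.Dict String (List String) :=
    module_order.foldl (fun d m => d.insert m []) PySem.Dict.empty
  let position : PySem.Dict String Int :=
    (PySem.List.enumerate module_order).foldl (fun d p => d.insert p.2 p.1) PySem.Dict.empty
  (module_order.foldl (fun kept module_ =>
      (PySem.List.sorted (rawd.getD module_ []) (fun item => position.getD item 1000000000) false).foldl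
        (fun kept dep =>
          if !(position.contains dep) then kept
          else if reachLoop kept module_ [dep] PySem.Set.empty then kept
          else kept.modify module_ [] (fun s => PySem.Set.add s dep))
        kept)
    kept0).items

-- ===== PORT B =====
-- 'for u in keys: d[u] |= src' — both closure-merge loops of B are this one helper
def pairMerge (keys : List String) (src : List String)
    (d : PySem.Dict String (List String)) : PySem.Dict String (List String) :=
  keys.foldl (fun d u => d.modify u [] (fun s => PySem.Set.update s src)) d

def break_cycles_py_alt (raw_deps : List (String × List String)) (module_order : List String) : List (String × List String) :=
  let rawd : PySem.Dict String (List String) := PySem.Dict.mk raw_deps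
  let kept0 : PySem.Dict String (List String) :=
    module_order.foldl (fun d m => d.insert m []) PySem.Dict.empty
  let position : PySem.Dict String Int :=
    (PySem.List.enumerate module_order).foldl (fun d p => d.insert p.2 p.1) PySem.Dict.empty
  -- reach[m] = {m}, coreach[m] = {m}: the closure of the (still empty) kept graph
  let reach0 : PySem.Dict String (List String) :=
    module_order.foldl (fun d m => d.insert m [m]) PySem.Dict.empty
  let coreach0 : PySem.Dict String (List String) :=
    module_order.foldl (fun d m => d.insert m [m]) PySem.Dict.empty
  (module_order.foldl (fun (st : PySem.Dict String (List String) × PySem.Dict String (List String) × PySem.Dict String (List String)) module_ =>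
      (PySem.List.sorted (rawd.getD module_ []) (fun item => position.getD item 1000000000) false).foldl
        (fun st dep =>
          if !(position.contains dep) then st
          else if (st.2.1.getD dep []).contains module_ then st
          else (st.1.modify module_ [] (fun s => PySem.Set.add s dep),
                pairMerge (st.2.2.getD module_ []) (st.2.1.getD dep []) st.2.1,
                pairMerge (st.2.1.getD dep []) (st.2.2.getD module_ []) st.2.2))
        st)
    (kept0, reach0, coreach0)).1.items

-- ===== PRECONDITION & SPEC =====
def Spec_break_cycles_py (raw_deps : List (String × List String)) (module_order : List String) (out : List (String × List String)) : Prop := out = break_cycles_py_alt raw_deps module_order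
instance (raw_deps : List (String × List String)) (module_order : List String) (out : List (String × List String)) : Decidable (Spec_break_cycles_py raw_deps module_order out) := by unfold Spec_break_cycles_py; infer_instance

-- ===== CLAIM =====
def Claim_equal_break_cycles_py : Prop := ∀ (raw_deps : List (String × List String)) (module_order : List String), Dom_break_cycles_py raw_deps module_order → Spec_break_cycles_py raw_deps module_order (break_cycles_py raw_deps module_order)

-- ===== LEMMAS AND PROOFS =====

/-- Edge relation of a dictionary mapping nodes to successor lists. -/
def bcRel (kept : PySem.Dict String (List String)) (u v : String) : Prop := v ∈ kept.getD u []

/-- Reachability over such edges (reflexive-transitive). -/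
def bcReach (kept : PySem.Dict String (List String)) : String → String → Prop :=
  Relation.ReflTransGen (bcRel kept)

/-- Search invariant: every seen node is not the target and has all successors in seen ∪ frontier. -/
def bcClosed (deps : PySem.Dict String (List String)) (target : String)
    (seen frontier : List String) : Prop :=
  ∀ u ∈ seen, u ≠ target ∧ ∀ v ∈ deps.getD u [], v ∈ seen ∨ v ∈ frontier

theorem bcEscape (deps : PySem.Dict String (List String)) (target : String)
    (seen frontier : List String) (hcl : bcClosed deps target seen frontier)
    {u : String} (hu : u ∈ seen) (hr : bcReach deps u target) :
    ∃ x ∈ frontier, bcReach deps x target := by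
  revert hu
  induction hr using Relation.ReflTransGen.head_induction_on with
  | refl =>
    intro ht
    exact absurd rfl (hcl target ht).1
  | head hac hcb ih =>
    rename_i a c
    intro ha
    rcases (hcl a ha).2 c hac with hc | hc
    · exact ih hc
    · exact ⟨c, hc, hcb⟩

theorem reachLoop_sound (deps : PySem.Dict String (List String)) (target : String) :
    ∀ stack seen, reachLoop deps target stack seen = true →
      ∃ x ∈ stack, bcReach deps x target := by
  intro stack seen
  induction stack, seen using reachLoop.induct deps target with
  | case1 seen => intro h; simp [reachLoop] at h
  | case2 seen cur rest h =>
    intro _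
    refine ⟨cur, List.mem_cons_self, ?_⟩
    have : cur = target := by simpa using h
    exact this ▸ Relation.ReflTransGen.refl
  | case3 seen cur rest h hs ih =>
    intro hr
    rw [reachLoop, if_neg h, if_pos hs] at hr
    rcases ih hr with ⟨x, hx, hxr⟩
    exact ⟨x, List.mem_cons_of_mem _ hx, hxr⟩
  | case4 seen cur rest h hs ih =>
    intro hr
    rw [reachLoop, if_neg h, if_neg hs] at hr
    rcases ih hr with ⟨x, hx, hxr⟩
    rcases List.mem_append.mp hx with hx' | hx'
    · exact ⟨cur, List.mem_cons_self,
        Relation.ReflTransGen.head (List.mem_reverse.mp hx') hxr⟩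
    · exact ⟨x, List.mem_cons_of_mem _ hx', hxr⟩

theorem reachLoop_complete (deps : PySem.Dict String (List String)) (target : String) :
    ∀ stack seen, bcClosed deps target seen stack →
      (∃ x ∈ stack, bcReach deps x target) → reachLoop deps target stack seen = true := by
  intro stack seen
  induction stack, seen using reachLoop.induct deps target with
  | case1 seen =>
    rintro _ ⟨x, hx, _⟩
    simp at hx
  | case2 seen cur rest h =>
    intro _ _
    rw [reachLoop, if_pos h]
  | case3 seen cur rest h hs ih =>
    rintro hcl ⟨x, hx, hr⟩
    have hcur : cur ∈ seen := by simpa [PySem.Set.contains] using hs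
    have hcl' : bcClosed deps target seen rest := by
      intro u hu
      refine ⟨(hcl u hu).1, fun v hv => ?_⟩
      rcases (hcl u hu).2 v hv with h1 | h1
      · exact Or.inl h1
      · rcases List.mem_cons.mp h1 with rfl | h2
        · exact Or.inl hcur
        · exact Or.inr h2
    have hex : ∃ x ∈ rest, bcReach deps x target := by
      rcases List.mem_cons.mp hx with rfl | hx'
      · exact bcEscape deps target seen rest hcl' hcur hr
      · exact ⟨x, hx', hr⟩
    rw [reachLoop, if_neg h, if_pos hs]
    exact ih hcl' hex
  | case4 seen cur rest h hs ih =>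
    rintro hcl ⟨x, hx, hr⟩
    have hcl' : bcClosed deps target (PySem.Set.add seen cur)
        ((deps.getD cur []).reverse ++ rest) := by
      intro u hu
      rcases (PySem.Set.mem_add seen cur u).mp hu with hu' | rfl
      · refine ⟨(hcl u hu').1, fun v hv => ?_⟩
        rcases (hcl u hu').2 v hv with h1 | h1
        · exact Or.inl ((PySem.Set.mem_add seen cur v).mpr (Or.inl h1))
        · rcases List.mem_cons.mp h1 with rfl | h2
          · exact Or.inl ((PySem.Set.mem_add seen v v).mpr (Or.inr rfl))
          · exact Or.inr (List.mem_append_right _ h2)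
      · refine ⟨by simpa using h, fun v hv => ?_⟩
        exact Or.inr (List.mem_append_left _ (List.mem_reverse.mpr hv))
    have hex : ∃ x ∈ (deps.getD cur []).reverse ++ rest, bcReach deps x target := by
      rcases List.mem_cons.mp hx with rfl | hx'
      · rcases Relation.ReflTransGen.cases_head hr with heq | ⟨v, hv, hvt⟩
        · exact absurd heq (by simpa using h)
        · exact ⟨v, List.mem_append_left _ (List.mem_reverse.mpr hv), hvt⟩
      · exact ⟨x, List.mem_append_right _ hx', hr⟩
    rw [reachLoop, if_neg h, if_neg hs]
    exact ih hcl' hex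

theorem reachLoop_iff (deps : PySem.Dict String (List String)) (target s : String) :
    reachLoop deps target [s] PySem.Set.empty = true ↔ bcReach deps s target := by
  constructor
  · intro h
    rcases reachLoop_sound deps target [s] PySem.Set.empty h with ⟨x, hx, hr⟩
    rwa [List.mem_singleton.mp hx] at hr
  · intro hr
    refine reachLoop_complete deps target [s] PySem.Set.empty ?_ ⟨s, List.mem_singleton.mpr rfl, hr⟩
    intro u hu
    simp [PySem.Set.empty] at hu

theorem bcRel_modify (kept : PySem.Dict String (List String)) (m d u v : String) :
    bcRel (kept.modify m [] (fun s => PySem.Set.add s d)) u v ↔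
      bcRel kept u v ∨ (u = m ∧ v = d) := by
  unfold bcRel
  rw [PySem.Dict.getD_modify]
  by_cases hu : u = m
  · subst hu
    rw [if_pos rfl, PySem.Set.mem_add]
    tauto
  · rw [if_neg hu]
    tauto

/-- Adding an edge m→d that closes no cycle extends reachability exactly by routing through it. -/
theorem bcReach_add_edge (kept : PySem.Dict String (List String)) (m d : String)
    (hnd : ¬ bcReach kept d m) (u v : String) :
    bcReach (kept.modify m [] (fun s => PySem.Set.add s d)) u v ↔
      bcReach kept u v ∨ (bcReach kept u m ∧ bcReach kept d v) := by
  constructor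
  · intro h
    induction h using Relation.ReflTransGen.head_induction_on with
    | refl => exact Or.inl Relation.ReflTransGen.refl
    | head hac hcb ih =>
      rename_i a c
      rcases (bcRel_modify kept m d a c).mp hac with he | ⟨rfl, rfl⟩
      · rcases ih with h1 | ⟨h1, h2⟩
        · exact Or.inl (Relation.ReflTransGen.head he h1)
        · exact Or.inr ⟨Relation.ReflTransGen.head he h1, h2⟩
      · rcases ih with h1 | ⟨h1, _⟩
        · exact Or.inr ⟨Relation.ReflTransGen.refl, h1⟩
        · exact absurd h1 hnd
  · rintro (h | ⟨h1, h2⟩)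
    · exact Relation.ReflTransGen.mono (fun x y hxy => (bcRel_modify kept m d x y).mpr (Or.inl hxy)) h
    · refine Relation.ReflTransGen.trans
        (Relation.ReflTransGen.mono (fun x y hxy => (bcRel_modify kept m d x y).mpr (Or.inl hxy)) h1)
        (Relation.ReflTransGen.head ((bcRel_modify kept m d m d).mpr (Or.inr ⟨rfl, rfl⟩)) ?_)
      exact Relation.ReflTransGen.mono (fun x y hxy => (bcRel_modify kept m d x y).mpr (Or.inl hxy)) h2

/-- Membership after a pairMerge loop. -/
theorem pairMerge_mem (src : List String) :
    ∀ (keys : List String) (d : PySem.Dict String (List String)) (u v : String),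
      (v ∈ (pairMerge keys src d).getD u [] ↔
        v ∈ d.getD u [] ∨ (u ∈ keys ∧ v ∈ src)) := by
  intro keys
  induction keys with
  | nil => intro d u v; simp [pairMerge]
  | cons w t ih =>
    intro d u v
    unfold pairMerge at ih ⊢
    simp only [List.foldl_cons]
    rw [ih]
    rw [PySem.Dict.getD_modify]
    by_cases huw : u = w
    · subst huw
      rw [if_pos rfl, PySem.Set.mem_update, List.mem_cons]
      tauto
    · rw [if_neg huw, List.mem_cons]
      tauto

theorem getD_foldl_insert_const (l : List String) (d : PySem.Dict String (List String))
    (f : String → List String) (u : String) :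
    (l.foldl (fun d m => d.insert m (f m)) d).getD u [] = if u ∈ l then f u else d.getD u [] := by
  induction l generalizing d with
  | nil => simp
  | cons m t ih =>
    simp only [List.foldl_cons, ih]
    by_cases hu : u ∈ t
    · simp [hu]
    · by_cases hum : u = m
      · subst hum
        simp [hu]
      · simp [hu, hum, PySem.Dict.getD_insert]

theorem bcRel_init (mo : List String) (a b : String) :
    ¬ bcRel (mo.foldl (fun d m => d.insert m []) PySem.Dict.empty) a b := by
  intro hb
  unfold bcRel at hb
  rw [getD_foldl_insert_const mo PySem.Dict.empty (fun _ => []) a] at hb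
  by_cases h : a ∈ mo
  · simp [h] at hb
  · simp [h, PySem.Dict.getD_empty] at hb

theorem bcReach_init (mo : List String) (u v : String) :
    bcReach (mo.foldl (fun d m => d.insert m []) PySem.Dict.empty) u v ↔ u = v := by
  constructor
  · intro h
    induction h using Relation.ReflTransGen.head_induction_on with
    | refl => rfl
    | head hac _ _ => exact absurd hac (bcRel_init mo _ _)
  · rintro rfl
    exact Relation.ReflTransGen.refl

/-- B's reach/coreach dictionaries are the forward and backward transitive closure of A's kept graph. -/
def bcInv (mo : List String) (kept reach coreach : PySem.Dict String (List String)) : Prop :=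
  (∀ u ∈ mo, ∀ v, (v ∈ reach.getD u [] ↔ bcReach kept u v)) ∧
  (∀ v ∈ mo, ∀ u, (u ∈ coreach.getD v [] ↔ (u ∈ mo ∧ bcReach kept u v)))

theorem position_contains_mem (mo : List String) (x : String)
    (h : ((PySem.List.enumerate mo).foldl (fun d p => d.insert p.2 p.1) PySem.Dict.empty).contains x = true) :
    x ∈ mo := by
  have hk := (PySem.Dict.contains_iff_mem_keys _ x).mp h
  rw [PySem.Dict.keys_foldl_insert_key] at hk
  rw [PySem.List.map_snd_enumerate] at hk
  rcases (PySem.Set.mem_update _ _ x).mp hk with h' | h'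
  · simp [PySem.Dict.keys_empty] at h'
  · exact h'

theorem bcInv_step (mo : List String) (kept reach coreach : PySem.Dict String (List String))
    (module_ dep : String) (hm : module_ ∈ mo) (hdep : dep ∈ mo)
    (hinv : bcInv mo kept reach coreach)
    (hnc : module_ ∉ reach.getD dep []) :
    bcInv mo (kept.modify module_ [] (fun s => PySem.Set.add s dep))
             (pairMerge (coreach.getD module_ []) (reach.getD dep []) reach)
             (pairMerge (reach.getD dep []) (coreach.getD module_ []) coreach) := by
  obtain ⟨hR, hC⟩ := hinv
  have hnd : ¬ bcReach kept dep module_ := fun h => hnc ((hR dep hdep module_).mpr h)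
  constructor
  · intro u hu v
    rw [pairMerge_mem (reach.getD dep []) (coreach.getD module_ []) reach u v,
        bcReach_add_edge kept module_ dep hnd u v,
        hR u hu v, hC module_ hm u]
    constructor
    · rintro (h | ⟨⟨_, hm'⟩, hv⟩)
      · exact Or.inl h
      · exact Or.inr ⟨hm', (hR dep hdep v).mp hv⟩
    · rintro (h | ⟨hm', hv⟩)
      · exact Or.inl h
      · exact Or.inr ⟨⟨hu, hm'⟩, (hR dep hdep v).mpr hv⟩
  · intro v hv u
    rw [pairMerge_mem (coreach.getD module_ []) (reach.getD dep []) coreach v u,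
        bcReach_add_edge kept module_ dep hnd u v,
        hC v hv u, hR dep hdep v]
    constructor
    · rintro (⟨hu, h⟩ | ⟨hd, hu⟩)
      · exact ⟨hu, Or.inl h⟩
      · exact ⟨((hC module_ hm u).mp hu).1, Or.inr ⟨((hC module_ hm u).mp hu).2, hd⟩⟩
    · rintro ⟨hu, h | ⟨h1, h2⟩⟩
      · exact Or.inl ⟨hu, h⟩
      · exact Or.inr ⟨h2, (hC module_ hm u).mpr ⟨hu, h1⟩⟩

theorem bcFold_inner (mo : List String)
    (position : PySem.Dict String Int)
    (hpos : ∀ x, position.contains x = true → x ∈ mo)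
    (module_ : String) (hm : module_ ∈ mo) :
    ∀ (l : List String) (kept reach coreach : PySem.Dict String (List String)),
      bcInv mo kept reach coreach →
      (l.foldl (fun kept dep =>
          if !(position.contains dep) then kept
          else if reachLoop kept module_ [dep] PySem.Set.empty then kept
          else kept.modify module_ [] (fun s => PySem.Set.add s dep)) kept
        = (l.foldl (fun st dep =>
            if !(position.contains dep) then st
            else if (st.2.1.getD dep []).contains module_ then st
            else (st.1.modify module_ [] (fun s => PySem.Set.add s dep),
                  pairMerge (st.2.2.getD module_ []) (st.2.1.getD dep []) st.2.1,
                  pairMerge (st.2.1.getD dep []) (st.2.2.getD module_ []) st.2.2))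
          (kept, reach, coreach)).1)
      ∧ bcInv mo
          (l.foldl (fun st dep =>
            if !(position.contains dep) then st
            else if (st.2.1.getD dep []).contains module_ then st
            else (st.1.modify module_ [] (fun s => PySem.Set.add s dep),
                  pairMerge (st.2.2.getD module_ []) (st.2.1.getD dep []) st.2.1,
                  pairMerge (st.2.1.getD dep []) (st.2.2.getD module_ []) st.2.2))
            (kept, reach, coreach)).1
          (l.foldl (fun st dep =>
            if !(position.contains dep) then st
            else if (st.2.1.getD dep []).contains module_ then st
            else (st.1.modify module_ [] (fun s => PySem.Set.add s dep),
                  pairMerge (st.2.2.getD module_ []) (st.2.1.getD dep []) st.2.1,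
                  pairMerge (st.2.1.getD dep []) (st.2.2.getD module_ []) st.2.2))
            (kept, reach, coreach)).2.1
          (l.foldl (fun st dep =>
            if !(position.contains dep) then st
            else if (st.2.1.getD dep []).contains module_ then st
            else (st.1.modify module_ [] (fun s => PySem.Set.add s dep),
                  pairMerge (st.2.2.getD module_ []) (st.2.1.getD dep []) st.2.1,
                  pairMerge (st.2.1.getD dep []) (st.2.2.getD module_ []) st.2.2))
            (kept, reach, coreach)).2.2 := by
  intro l
  induction l with
  | nil =>
    intro kept reach coreach hinv
    exact ⟨rfl, hinv⟩
  | cons dep t ih =>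
    intro kept reach coreach hinv
    simp only [List.foldl_cons]
    by_cases hp : position.contains dep = true
    · have hdep : dep ∈ mo := hpos dep hp
      have htest : reachLoop kept module_ [dep] PySem.Set.empty
          = (reach.getD dep []).contains module_ := by
        apply Bool.eq_iff_iff.mpr
        rw [reachLoop_iff]
        constructor
        · intro h
          simpa using (hinv.1 dep hdep module_).mpr h
        · intro h
          exact (hinv.1 dep hdep module_).mp (by simpa using h)
      cases hb : (reach.getD dep []).contains module_ with
      | true =>
        simp only [hp, Bool.not_true, Bool.false_eq_true, if_false, htest, hb, if_true]
        exact ih kept reach coreach hinv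
      | false =>
        have hnc : module_ ∉ reach.getD dep [] := by simpa using hb
        simp only [hp, Bool.not_true, Bool.false_eq_true, if_false, htest, hb]
        exact ih _ _ _ (bcInv_step mo kept reach coreach module_ dep hm hdep hinv hnc)
    · have hp' : position.contains dep = false := by simpa using hp
      simp only [hp', Bool.not_false, if_true]
      exact ih kept reach coreach hinv

theorem bcFold_outer (mo : List String)
    (position : PySem.Dict String Int)
    (hpos : ∀ x, position.contains x = true → x ∈ mo)
    (rawd : PySem.Dict String (List String)) :
    ∀ (ms : List String), (∀ x ∈ ms, x ∈ mo) →
      ∀ (kept reach coreach : PySem.Dict String (List String)), bcInv mo kept reach coreach →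
      (ms.foldl (fun kept module_ =>
          (PySem.List.sorted (rawd.getD module_ []) (fun item => position.getD item 1000000000) false).foldl
            (fun kept dep =>
              if !(position.contains dep) then kept
              else if reachLoop kept module_ [dep] PySem.Set.empty then kept
              else kept.modify module_ [] (fun s => PySem.Set.add s dep)) kept) kept
        = (ms.foldl (fun st module_ =>
            (PySem.List.sorted (rawd.getD module_ []) (fun item => position.getD item 1000000000) false).foldl
              (fun st dep =>
                if !(position.contains dep) then st
                else if (st.2.1.getD dep []).contains module_ then st
                else (st.1.modify module_ [] (fun s => PySem.Set.add s dep),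
                      pairMerge (st.2.2.getD module_ []) (st.2.1.getD dep []) st.2.1,
                      pairMerge (st.2.1.getD dep []) (st.2.2.getD module_ []) st.2.2))
              st) (kept, reach, coreach)).1) := by
  intro ms
  induction ms with
  | nil =>
    intro _ kept reach coreach hinv
    rfl
  | cons module_ t ih =>
    intro hms kept reach coreach hinv
    simp only [List.foldl_cons]
    have hstep := bcFold_inner mo position hpos module_ (hms module_ List.mem_cons_self)
      (PySem.List.sorted (rawd.getD module_ []) (fun item => position.getD item 1000000000) false)
      kept reach coreach hinv
    rw [hstep.1]
    have hrec := ih (fun x hx => hms x (List.mem_cons_of_mem _ hx)) _ _ _ hstep.2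
    rcases hsurj : ((PySem.List.sorted (rawd.getD module_ []) (fun item => position.getD item 1000000000) false).foldl
      (fun st dep =>
        if !(position.contains dep) then st
        else if (st.2.1.getD dep []).contains module_ then st
        else (st.1.modify module_ [] (fun s => PySem.Set.add s dep),
              pairMerge (st.2.2.getD module_ []) (st.2.1.getD dep []) st.2.1,
              pairMerge (st.2.1.getD dep []) (st.2.2.getD module_ []) st.2.2))
      (kept, reach, coreach)) with ⟨k', r', c'⟩
    rw [hsurj] at hrec ⊢
    exact hrec

theorem bcInv_init (mo : List String) :
    bcInv mo (mo.foldl (fun d m => d.insert m []) PySem.Dict.empty)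
             (mo.foldl (fun d m => d.insert m [m]) PySem.Dict.empty)
             (mo.foldl (fun d m => d.insert m [m]) PySem.Dict.empty) := by
  constructor
  · intro u hu v
    rw [bcReach_init mo u v,
        getD_foldl_insert_const mo PySem.Dict.empty (fun m => [m]) u, if_pos hu]
    simp [eq_comm]
  · intro v hv u
    rw [bcReach_init mo u v,
        getD_foldl_insert_const mo PySem.Dict.empty (fun m => [m]) v, if_pos hv]
    constructor
    · intro h
      have : u = v := by simpa using h
      exact ⟨this ▸ hv, this⟩
    · rintro ⟨_, rfl⟩
      simp

-- ===== VERDICT (by name: the statement is the Claim_ definition above) =====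
theorem break_cycles_py_spec : Claim_equal_break_cycles_py := by
  unfold Claim_equal_break_cycles_py
  intro raw_deps module_order _
  unfold Spec_break_cycles_py
  unfold break_cycles_py break_cycles_py_alt
  exact congrArg PySem.Dict.items
    (bcFold_outer module_order
      ((PySem.List.enumerate module_order).foldl (fun d p => d.insert p.2 p.1) PySem.Dict.empty)
      (position_contains_mem module_order)
      (PySem.Dict.mk raw_deps) module_order (fun _ h => h)
      (module_order.foldl (fun d m => d.insert m []) PySem.Dict.empty)
      (module_order.foldl (fun d m => d.insert m [m]) PySem.Dict.empty)
      (module_order.foldl (fun d m => d.insert m [m]) PySem.Dict.empty)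
      (bcInv_init module_order))
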